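-- pv_equiv track=rewrite | github.com/aleksas/re-map | re_map/utils.py | text_range
-- ===== SOURCE A (Python) =====
-- def text_range(text, processed_text, span_map, source_len_limit, target_len_limit):
--     span_map_length = len(span_map)
--     for start in range(span_map_length):
--         for end in range(start, span_map_length):
--             source_start = span_map[start][0][0]
--             source_end = span_map[end][0][1]
--             target_start = span_map[start][1][0]
--             target_end = span_map[end][1][1]
--             if ( source_end - source_start < source_len_limit and
--                 target_end - target_start < source_len_limit) :
--                 continue
--             else:
--                 yield text[source_start:source_end], processed_text[target_start:target_end]
--                 break
-- ===== SOURCE B (Python) =====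
-- # B: instead of a quadratic nested scan, build two max segment trees over the
-- # span end-points once, and answer "first end index >= start whose end-point
-- # reaches the threshold" in O(log n) per start; note A compares BOTH span
-- # lengths against source_len_limit (target_len_limit is unused) -- reproduced.
--
-- def _build(vals, lo):
--     # segment tree node over indices [lo, lo+len(vals)); vals is non-empty
--     n = len(vals)
--     if n == 1:
--         return ('leaf', lo, vals[0])
--     m = n // 2
--     left = _build(vals[:m], lo)
--     right = _build(vals[m:], lo + m)
--     return ('node', lo, lo + n, max(left[2] if left[0] == 'leaf' else left[3],
--                                     right[2] if right[0] == 'leaf' else right[3]),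
--             left, right)
--
-- def _first_ge(t, start, x):
--     # least index j >= start in t's range with value[j] >= x, else None
--     if t[0] == 'leaf':
--         _, idx, v = t
--         return idx if idx >= start and v >= x else None
--     _, _, hi, maxv, left, right = t
--     if hi <= start or maxv < x:
--         return None
--     j = _first_ge(left, start, x)
--     return j if j is not None else _first_ge(right, start, x)
--
-- def text_range(text, processed_text, span_map, source_len_limit, target_len_limit):
--     n = len(span_map)
--     if n == 0:
--         return
--     se = [p[0][1] for p in span_map]
--     te = [p[1][1] for p in span_map]
--     se_tree = _build(se, 0)
--     te_tree = _build(te, 0)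
--     for start, ((s0, _), (t0, _)) in enumerate(span_map):
--         j1 = _first_ge(se_tree, start, s0 + source_len_limit)
--         j2 = _first_ge(te_tree, start, t0 + source_len_limit)
--         if j1 is None:
--             j = j2
--         elif j2 is None:
--             j = j1
--         else:
--             j = min(j1, j2)
--         if j is not None:
--             yield text[s0:se[j]], processed_text[t0:te[j]]
-- ===== Notes on version B (the rewrite author's own statement) =====
-- stated objective: faster
-- what changed: A's nested quadratic scan (for each start, linearly scan ends until a span reaches the limit) is replaced by two max segment trees built once over the source/target span end-points, answering 'first end index >= start whose end-point reaches the threshold' in O(log n) per start and taking the minimum of the two answers.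
import Mathlib
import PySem

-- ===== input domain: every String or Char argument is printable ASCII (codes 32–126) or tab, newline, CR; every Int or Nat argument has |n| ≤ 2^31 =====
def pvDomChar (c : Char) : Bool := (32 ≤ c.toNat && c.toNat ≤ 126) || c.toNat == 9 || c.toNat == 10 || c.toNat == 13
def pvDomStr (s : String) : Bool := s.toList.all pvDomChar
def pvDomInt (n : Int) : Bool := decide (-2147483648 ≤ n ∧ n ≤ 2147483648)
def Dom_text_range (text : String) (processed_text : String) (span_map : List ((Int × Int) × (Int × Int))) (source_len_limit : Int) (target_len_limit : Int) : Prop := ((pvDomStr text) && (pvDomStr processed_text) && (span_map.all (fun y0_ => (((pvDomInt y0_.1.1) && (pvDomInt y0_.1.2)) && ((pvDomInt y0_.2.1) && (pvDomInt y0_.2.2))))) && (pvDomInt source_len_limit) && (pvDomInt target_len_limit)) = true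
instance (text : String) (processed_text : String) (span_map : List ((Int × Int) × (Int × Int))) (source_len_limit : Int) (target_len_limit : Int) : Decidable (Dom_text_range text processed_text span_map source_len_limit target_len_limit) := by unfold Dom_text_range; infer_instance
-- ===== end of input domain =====

-- B replaces A's quadratic nested scan by two max segment trees over the span
-- end-points with an O(log n)-per-start "first index reaching the threshold"
-- query (objective: faster).  Like A, B compares both span lengths against
-- source_len_limit (A never uses target_len_limit); list(A(...)) is compared,
-- i.e. the generator's yielded sequence.

-- ===== PORT A =====
-- inner 'for end in range(start, n)' loop: continue / yield-then-break
def pvInnerA (text : String) (processed_text : String)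
    (span_map : List ((Int × Int) × (Int × Int))) (source_len_limit : Int)
    (start : Int) : List Int → List (String × String)
  | [] => []
  | e :: rest =>
    let d : (Int × Int) × (Int × Int) := ((0, 0), (0, 0))
    let source_start := (PySem.List.pyGetD span_map start d).1.1
    let source_end := (PySem.List.pyGetD span_map e d).1.2
    let target_start := (PySem.List.pyGetD span_map start d).2.1
    let target_end := (PySem.List.pyGetD span_map e d).2.2
    if source_end - source_start < source_len_limit ∧
        target_end - target_start < source_len_limit then
      pvInnerA text processed_text span_map source_len_limit start rest
    else
      [(PySem.Str.slice text (some source_start) (some source_end),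
        PySem.Str.slice processed_text (some target_start) (some target_end))]

def text_range (text : String) (processed_text : String) (span_map : List ((Int × Int) × (Int × Int))) (source_len_limit : Int) (target_len_limit : Int) : List (String × String) :=
  let span_map_length : Int := span_map.length
  (PySem.List.pyRange 0 span_map_length 1).foldl
    (fun acc start =>
      acc ++ pvInnerA text processed_text span_map source_len_limit start
          (PySem.List.pyRange start span_map_length 1)) []

-- ===== PORT B =====
-- max segment tree over a list of values; leaf idx val / node lo hi maxv l r
inductive PvTree where
  | leaf : Int → Int → PvTree
  | node : Int → Int → Int → PvTree → PvTree → PvTree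
deriving DecidableEq, Repr

def pvMaxv : PvTree → Int
  | .leaf _ v => v
  | .node _ _ m _ _ => m

-- Python _build; never called on an empty segment (the [] arm is unreachable)
def pvBuild : List Int → Int → PvTree
  | [], lo => .leaf lo 0
  | [v], lo => .leaf lo v
  | v1 :: v2 :: rest, lo =>
    let vals := v1 :: v2 :: rest
    let m := vals.length / 2
    let left := pvBuild (vals.take m) lo
    let right := pvBuild (vals.drop m) (lo + (m : Int))
    .node lo (lo + (vals.length : Int)) (max (pvMaxv left) (pvMaxv right)) left right
termination_by vals _ => vals.length
decreasing_by
  · simp [List.length_take]; omega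
  · simp [List.length_drop]; omega

-- Python _first_ge
def pvFirstGe : PvTree → Int → Int → Option Int
  | .leaf idx v, start, x => if idx ≥ start ∧ v ≥ x then some idx else none
  | .node _ hi maxv l r, start, x =>
    if hi ≤ start ∨ maxv < x then none
    else
      match pvFirstGe l start x with
      | some j => some j
      | none => pvFirstGe r start x

def pvMin2 : Option Int → Option Int → Option Int
  | none, b => b
  | some a, none => some a
  | some a, some b => some (min a b)

def text_range_alt (text : String) (processed_text : String) (span_map : List ((Int × Int) × (Int × Int))) (source_len_limit : Int) (target_len_limit : Int) : List (String × String) :=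
  if span_map.length = 0 then []
  else
    let se := span_map.map (fun p => p.1.2)
    let te := span_map.map (fun p => p.2.2)
    let seTree := pvBuild se 0
    let teTree := pvBuild te 0
    (PySem.List.enumerate span_map 0).foldl
      (fun acc p =>
        let start := p.1
        let s0 := p.2.1.1
        let t0 := p.2.2.1
        let j1 := pvFirstGe seTree start (s0 + source_len_limit)
        let j2 := pvFirstGe teTree start (t0 + source_len_limit)
        match pvMin2 j1 j2 with
        | none => acc
        | some j =>
          acc ++ [(PySem.Str.slice text (some s0) (some (PySem.List.pyGetD se j 0)),
                   PySem.Str.slice processed_text (some t0) (some (PySem.List.pyGetD te j 0)))])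
      []

-- ===== PRECONDITION & SPEC =====
def Spec_text_range (text : String) (processed_text : String) (span_map : List ((Int × Int) × (Int × Int))) (source_len_limit : Int) (target_len_limit : Int) (out : List (String × String)) : Prop := out = text_range_alt text processed_text span_map source_len_limit target_len_limit
instance (text : String) (processed_text : String) (span_map : List ((Int × Int) × (Int × Int))) (source_len_limit : Int) (target_len_limit : Int) (out : List (String × String)) : Decidable (Spec_text_range text processed_text span_map source_len_limit target_len_limit out) := by unfold Spec_text_range; infer_instance

-- ===== CLAIM (what is proved, stated in full; the proofs are below) =====
def Claim_equal_text_range : Prop := ∀ (text : String) (processed_text : String) (span_map : List ((Int × Int) × (Int × Int))) (source_len_limit : Int) (target_len_limit : Int), Dom_text_range text processed_text span_map source_len_limit target_len_limit → Spec_text_range text processed_text span_map source_len_limit target_len_limit (text_range text processed_text span_map source_len_limit target_len_limit)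

-- ===== LEMMAS AND PROOFS =====

-- reference: first index j (counting from lo) with j ≥ start and vals[j-lo] ≥ x
def pvLinFirst : List Int → Int → Int → Int → Option Int
  | [], _, _, _ => none
  | v :: rest, lo, start, x =>
    if lo ≥ start ∧ v ≥ x then some lo else pvLinFirst rest (lo + 1) start x

-- reference for the combined or-condition, walking the rows from index lo ≥ start
def pvFindOr (X Y : Int) : List ((Int × Int) × (Int × Int)) → Int → Option Int
  | [], _ => none
  | r :: rest, lo =>
    if r.1.2 ≥ X ∨ r.2.2 ≥ Y then some lo else pvFindOr X Y rest (lo + 1)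

theorem pvLinFirst_ge {vals : List Int} {lo start x j : Int}
    (h : pvLinFirst vals lo start x = some j) : lo ≤ j := by
  induction vals generalizing lo with
  | nil => simp [pvLinFirst] at h
  | cons v rest ih =>
    simp only [pvLinFirst] at h
    split at h
    · simp only [Option.some.injEq] at h; omega
    · have := ih h; omega

theorem pvLinFirst_append (a b : List Int) (lo start x : Int) :
    pvLinFirst (a ++ b) lo start x =
      (match pvLinFirst a lo start x with
       | some j => some j
       | none => pvLinFirst b (lo + a.length) start x) := by
  induction a generalizing lo with
  | nil => simp [pvLinFirst]
  | cons v rest ih =>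
    simp only [List.cons_append, pvLinFirst]
    split
    · rfl
    · rw [ih]; simp; ring_nf

theorem pvLinFirst_none_of_hi_le (vals : List Int) (lo start x : Int)
    (h : lo + vals.length ≤ start) : pvLinFirst vals lo start x = none := by
  induction vals generalizing lo with
  | nil => rfl
  | cons v rest ih =>
    simp only [List.length_cons] at h
    simp only [pvLinFirst]
    rw [if_neg (by push_cast at h ⊢; omega)]
    exact ih _ (by push_cast at h ⊢; omega)

theorem pvLinFirst_none_of_max_lt (vals : List Int) (lo start x : Int)
    (h : ∀ v ∈ vals, v < x) : pvLinFirst vals lo start x = none := by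
  induction vals generalizing lo with
  | nil => rfl
  | cons v rest ih =>
    simp only [pvLinFirst]
    rw [if_neg (by have := h v (by simp); omega)]
    exact ih _ (fun v hv => h v (by simp [hv]))

theorem pvBuild_le_maxv (vals : List Int) (lo : Int) :
    ∀ v ∈ vals, v ≤ pvMaxv (pvBuild vals lo) := by
  match vals with
  | [] => intro v hv; simp at hv
  | [w] => intro v hv; simp at hv; simp [pvBuild, pvMaxv, hv]
  | v1 :: v2 :: rest =>
    intro v hv
    have hmax : pvMaxv (pvBuild (v1 :: v2 :: rest) lo) =
        max (pvMaxv (pvBuild ((v1 :: v2 :: rest).take ((v1 :: v2 :: rest).length / 2)) lo))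
            (pvMaxv (pvBuild ((v1 :: v2 :: rest).drop ((v1 :: v2 :: rest).length / 2))
              (lo + (((v1 :: v2 :: rest).length / 2 : Nat) : Int)))) := by
      rw [pvBuild]; rfl
    rw [hmax]
    have hsplit : v ∈ (v1 :: v2 :: rest).take ((v1 :: v2 :: rest).length / 2) ∨
        v ∈ (v1 :: v2 :: rest).drop ((v1 :: v2 :: rest).length / 2) := by
      rw [← List.mem_append, List.take_append_drop]; exact hv
    rcases hsplit with h | h
    · exact le_trans (pvBuild_le_maxv _ lo v h) (le_max_left _ _)
    · exact le_trans (pvBuild_le_maxv _ (lo + (((v1 :: v2 :: rest).length / 2 : Nat) : Int)) v h)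
        (le_max_right _ _)
termination_by vals.length
decreasing_by
  · simp [List.length_take]; omega
  · simp [List.length_drop]; omega

theorem pvFirstGe_build (vals : List Int) (lo start x : Int) (hne : vals ≠ []) :
    pvFirstGe (pvBuild vals lo) start x = pvLinFirst vals lo start x := by
  match vals with
  | [] => exact absurd rfl hne
  | [v] => simp [pvBuild, pvFirstGe, pvLinFirst]
  | v1 :: v2 :: rest =>
    rw [pvBuild]
    simp only [pvFirstGe]
    set L := v1 :: v2 :: rest with hL
    set m := L.length / 2 with hm
    have hmlt : m < L.length := by simp [hm, hL]; omega
    have hm1 : 1 ≤ m := by simp [hm, hL]; omega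
    have htake : (L.take m).length = m := by simp [List.length_take]; omega
    have hIH1 := pvFirstGe_build (L.take m) lo start x (by
      intro h; have := congrArg List.length h; simp [htake] at this; omega)
    have hIH2 := pvFirstGe_build (L.drop m) (lo + (m : Int)) start x (by
      intro h; have := congrArg List.length h; simp at this; omega)
    split
    · rename_i hguard
      rcases hguard with h | h
      · exact (pvLinFirst_none_of_hi_le L lo start x (by push_cast at h ⊢; omega)).symm
      · refine (pvLinFirst_none_of_max_lt L lo start x ?_).symm
        intro v hv
        have hsplit : v ∈ L.take m ∨ v ∈ L.drop m := by
          rw [← List.mem_append, List.take_append_drop]; exact hv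
        rcases hsplit with hv' | hv'
        · have := pvBuild_le_maxv (L.take m) lo v hv'; omega
        · have := pvBuild_le_maxv (L.drop m) (lo + (m : Int)) v hv'; omega
    · conv_rhs => rw [← List.take_append_drop m L]
      rw [pvLinFirst_append, hIH1, hIH2, htake]
termination_by vals.length
decreasing_by
  · simp [List.length_take]; omega
  · simp [List.length_drop]; omega

theorem pvLinFirst_drop (vals : List Int) (k : Nat) (lo start x : Int)
    (h : lo + k ≤ start) :
    pvLinFirst vals lo start x = pvLinFirst (vals.drop k) (lo + k) start x := by
  induction k generalizing vals lo with
  | zero => simp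
  | succ k ih =>
    match vals with
    | [] => simp [pvLinFirst]
    | v :: rest =>
      simp only [pvLinFirst]
      rw [if_neg (by push_cast at h ⊢; omega)]
      rw [ih rest (lo + 1) (by push_cast at h ⊢; omega)]
      simp only [List.drop_succ_cons]
      congr 1
      push_cast
      ring

theorem pvMin2_linFirst (rows : List ((Int × Int) × (Int × Int))) (lo start X Y : Int)
    (h : start ≤ lo) :
    pvMin2 (pvLinFirst (rows.map (fun p => p.1.2)) lo start X)
           (pvLinFirst (rows.map (fun p => p.2.2)) lo start Y) =
      pvFindOr X Y rows lo := by
  induction rows generalizing lo with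
  | nil => simp [pvLinFirst, pvMin2, pvFindOr]
  | cons r rest ih =>
    simp only [List.map_cons, pvLinFirst, pvFindOr]
    by_cases h1 : r.1.2 ≥ X <;> by_cases h2 : r.2.2 ≥ Y
    · rw [if_pos ⟨h, h1⟩, if_pos ⟨h, h2⟩, if_pos (Or.inl h1)]
      simp [pvMin2]
    · rw [if_pos ⟨h, h1⟩, if_neg (by omega), if_pos (Or.inl h1)]
      cases hj : pvLinFirst (rest.map (fun p => p.2.2)) (lo + 1) start Y with
      | none => simp [pvMin2]
      | some j =>
        have := pvLinFirst_ge hj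
        simp [pvMin2]; omega
    · rw [if_neg (by omega), if_pos ⟨h, h2⟩, if_pos (Or.inr h2)]
      cases hj : pvLinFirst (rest.map (fun p => p.1.2)) (lo + 1) start X with
      | none => simp [pvMin2]
      | some j =>
        have := pvLinFirst_ge hj
        simp [pvMin2]; omega
    · rw [if_neg (by omega), if_neg (by omega), if_neg (by omega)]
      exact ih (lo + 1) (by omega)

theorem pvGetD_of_drop {sm : List ((Int × Int) × (Int × Int))} {j : Int}
    {r : (Int × Int) × (Int × Int)} {rest : List ((Int × Int) × (Int × Int))}
    (h0 : 0 ≤ j) (hd : sm.drop j.toNat = r :: rest) (d : (Int × Int) × (Int × Int)) :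
    PySem.List.pyGetD sm j d = r := by
  have h1 : sm[j.toNat]? = some r := by
    rw [← List.head?_drop, hd]; rfl
  obtain ⟨hlt, hget⟩ := List.getElem?_eq_some_iff.mp h1
  rw [PySem.List.pyGetD_eq_getElem sm d h0 (by omega)]
  exact hget

theorem pvInnerA_eq (text processed_text : String)
    (sm : List ((Int × Int) × (Int × Int))) (L start : Int)
    (rows : List ((Int × Int) × (Int × Int))) (j : Int)
    (h0 : 0 ≤ j) (hj : j ≤ (sm.length : Int)) (hd : sm.drop j.toNat = rows) :
    pvInnerA text processed_text sm L start (PySem.List.pyRange j (sm.length : Int) 1) =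
      (match pvFindOr ((PySem.List.pyGetD sm start ((0,0),(0,0))).1.1 + L)
               ((PySem.List.pyGetD sm start ((0,0),(0,0))).2.1 + L) rows j with
       | none => []
       | some k =>
         [(PySem.Str.slice text (some (PySem.List.pyGetD sm start ((0,0),(0,0))).1.1)
             (some (PySem.List.pyGetD (sm.map fun p => p.1.2) k 0)),
           PySem.Str.slice processed_text (some (PySem.List.pyGetD sm start ((0,0),(0,0))).2.1)
             (some (PySem.List.pyGetD (sm.map fun p => p.2.2) k 0)))]) := by
  induction rows generalizing j with
  | nil =>
    have hge : (sm.length : Int) ≤ j := by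
      have := congrArg List.length hd; simp at this; omega
    rw [PySem.List.pyRange_one_eq_nil hge]
    simp [pvInnerA, pvFindOr]
  | cons r rest ih =>
    have hlen : j.toNat < sm.length := by
      have := congrArg List.length hd; simp at this; omega
    have hjlt : j < (sm.length : Int) := by omega
    rw [PySem.List.pyRange_one_cons hjlt]
    have hr : PySem.List.pyGetD sm j ((0,0),(0,0)) = r := pvGetD_of_drop h0 hd _
    simp only [pvInnerA, pvFindOr, hr]
    by_cases hc : r.1.2 ≥ (PySem.List.pyGetD sm start ((0,0),(0,0))).1.1 + L ∨
        r.2.2 ≥ (PySem.List.pyGetD sm start ((0,0),(0,0))).2.1 + L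
    · rw [if_neg (by omega), if_pos hc]
      have hm1 : PySem.List.pyGetD (sm.map fun p => p.1.2) j 0 = r.1.2 := by
        have h := PySem.List.pyGetD_map (fun p => p.1.2) sm j ((0,0),(0,0))
        rw [hr] at h; exact h
      have hm2 : PySem.List.pyGetD (sm.map fun p => p.2.2) j 0 = r.2.2 := by
        have h := PySem.List.pyGetD_map (fun p => p.2.2) sm j ((0,0),(0,0))
        rw [hr] at h; exact h
      simp [hm1, hm2]
    · rw [if_pos (by omega), if_neg hc]
      refine ih (j + 1) (by omega) (by omega) ?_
      have ht : (j + 1).toNat = j.toNat + 1 := by omega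
      rw [ht, ← List.drop_drop, hd]
      rfl

-- ===== VERDICT (by name: the statement is the Claim_ definition above) =====
theorem text_range_spec : Claim_equal_text_range := by
  intro text processed_text sm L1 L2 _hdom
  unfold Spec_text_range
  by_cases hsm : sm = []
  · subst hsm
    simp [text_range, text_range_alt]
  · unfold text_range text_range_alt
    rw [if_neg (by simpa using hsm)]
    rw [PySem.List.enumerate_eq_map_pyRange sm ((0,0),(0,0)), List.foldl_map]
    simp only [PySem.List.len_eq]
    refine PySem.List.foldl_congr_mem _ _ _ _ ?_
    intro acc j hj
    rw [PySem.List.mem_pyRange_one] at hj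
    rw [pvInnerA_eq text processed_text sm L1 j (sm.drop j.toNat) j (by omega) (by omega) rfl]
    have hdropmap1 : (sm.map fun p => p.1.2).drop j.toNat = (sm.drop j.toNat).map (fun p => p.1.2) :=
      (List.map_drop ..).symm
    have hdropmap2 : (sm.map fun p => p.2.2).drop j.toNat = (sm.drop j.toNat).map (fun p => p.2.2) :=
      (List.map_drop ..).symm
    have hcast : (0 : Int) + (j.toNat : Int) = j := by omega
    have hse : pvFirstGe (pvBuild (sm.map fun p => p.1.2) 0) j
        ((PySem.List.pyGetD sm j ((0,0),(0,0))).1.1 + L1) =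
        pvLinFirst ((sm.drop j.toNat).map fun p => p.1.2) j j
          ((PySem.List.pyGetD sm j ((0,0),(0,0))).1.1 + L1) := by
      rw [pvFirstGe_build _ 0 j _ (by simp [hsm]),
        pvLinFirst_drop _ j.toNat 0 j _ (by omega), hdropmap1, hcast]
    have hte : pvFirstGe (pvBuild (sm.map fun p => p.2.2) 0) j
        ((PySem.List.pyGetD sm j ((0,0),(0,0))).2.1 + L1) =
        pvLinFirst ((sm.drop j.toNat).map fun p => p.2.2) j j
          ((PySem.List.pyGetD sm j ((0,0),(0,0))).2.1 + L1) := by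
      rw [pvFirstGe_build _ 0 j _ (by simp [hsm]),
        pvLinFirst_drop _ j.toNat 0 j _ (by omega), hdropmap2, hcast]
    simp only [hse, hte,
      pvMin2_linFirst (sm.drop j.toNat) j j _ _ le_rfl]
    cases pvFindOr ((PySem.List.pyGetD sm j ((0,0),(0,0))).1.1 + L1)
        ((PySem.List.pyGetD sm j ((0,0),(0,0))).2.1 + L1) (sm.drop j.toNat) j with
    | none => simp
    | some k => simp
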